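-- pv_equiv track=rewrite | github.com/Bimo144/compiladores-Bal | defi defi ya esta bueno.py | generar_codigo_intermedio
-- ===== SOURCE A (Python) =====
-- def generar_codigo_intermedio(tokens):
--     codigo_intermedio = []
--     for token in tokens:
--         tipo, valor = token[1], token[2]
--         if tipo == "NUMERO":
--             codigo_intermedio.append(f"LOAD {valor}")
--         elif tipo == "IDENTIFICADOR":
--             codigo_intermedio.append(f"STORE {valor}")
--         elif tipo == "OPERADOR_ARITMETICO":
--             codigo_intermedio.append(f"OPER {valor}")
--         elif tipo == "OPERADOR_ASIGNACION":
--             codigo_intermedio.append(f"ASSIGN {valor}")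
--         elif tipo == "OPERADOR_COMPARACION":
--             codigo_intermedio.append(f"COMPARE {valor}")
--     return codigo_intermedio
-- ===== SOURCE B (Python) =====
-- _PAIRS = (
--     ("NUMERO", "LOAD"),
--     ("IDENTIFICADOR", "STORE"),
--     ("OPERADOR_ARITMETICO", "OPER"),
--     ("OPERADOR_ASIGNACION", "ASSIGN"),
--     ("OPERADOR_COMPARACION", "COMPARE"),
-- )
--
-- def _emit(token):
--     # instructions for a single token: one line if its type is known, else none
--     for tipo, prefijo in _PAIRS:
--         if tipo == token[1]:
--             return [f"{prefijo} {token[2]}"]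
--     return []
--
-- def generar_codigo_intermedio(tokens):
--     # divide and conquer: correct because list concatenation is associative,
--     # so splitting anywhere and concatenating the halves' code preserves order
--     n = len(tokens)
--     if n == 0:
--         return []
--     if n == 1:
--         return _emit(tokens[0])
--     m = n // 2
--     return generar_codigo_intermedio(tokens[:m]) + generar_codigo_intermedio(tokens[m:])
-- ===== Notes on version B (the rewrite author's own statement) =====
-- stated objective: alternative
-- what changed: Replaces A's single left-to-right accumulator loop with if/elif dispatch by a divide-and-conquer recursion that splits the token list in half, translates each half independently via a per-token emitter scanning a (tipo, opcode) pair table, and concatenates the results.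
import Mathlib
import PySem

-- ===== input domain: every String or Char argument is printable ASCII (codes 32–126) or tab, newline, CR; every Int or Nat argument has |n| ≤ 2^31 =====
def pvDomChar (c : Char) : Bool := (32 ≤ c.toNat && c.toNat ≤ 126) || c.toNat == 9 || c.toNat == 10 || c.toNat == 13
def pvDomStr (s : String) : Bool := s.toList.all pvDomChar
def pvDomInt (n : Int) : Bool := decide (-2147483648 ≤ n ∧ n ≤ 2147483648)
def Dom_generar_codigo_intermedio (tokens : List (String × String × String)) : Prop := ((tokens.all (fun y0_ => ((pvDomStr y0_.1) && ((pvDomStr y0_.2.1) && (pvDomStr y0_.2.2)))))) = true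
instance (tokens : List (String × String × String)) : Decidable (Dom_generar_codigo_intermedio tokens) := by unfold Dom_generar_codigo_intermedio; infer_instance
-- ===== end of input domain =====

-- One line: B replaces A's accumulator loop with if/elif by a divide-and-conquer split with a pair-table emitter (alternative decomposition, same result).

-- ===== PORT A =====
def generar_codigo_intermedio (tokens : List (String × String × String)) : List String :=
  tokens.foldl (fun codigo_intermedio token =>
    let tipo := token.2.1
    let valor := token.2.2
    if tipo = "NUMERO" then codigo_intermedio ++ ["LOAD " ++ valor]
    else if tipo = "IDENTIFICADOR" then codigo_intermedio ++ ["STORE " ++ valor]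
    else if tipo = "OPERADOR_ARITMETICO" then codigo_intermedio ++ ["OPER " ++ valor]
    else if tipo = "OPERADOR_ASIGNACION" then codigo_intermedio ++ ["ASSIGN " ++ valor]
    else if tipo = "OPERADOR_COMPARACION" then codigo_intermedio ++ ["COMPARE " ++ valor]
    else codigo_intermedio) []

-- ===== PORT B =====
def pvPairs : List (String × String) :=
  [("NUMERO", "LOAD"), ("IDENTIFICADOR", "STORE"), ("OPERADOR_ARITMETICO", "OPER"),
   ("OPERADOR_ASIGNACION", "ASSIGN"), ("OPERADOR_COMPARACION", "COMPARE")]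

-- Source B's _emit: first matching pair in the table yields the instruction (findSome? = the for/return scan)
def pvEmit (token : String × String × String) : List String :=
  (pvPairs.findSome? (fun tp =>
    if tp.1 = token.2.1 then some (tp.2 ++ " " ++ token.2.2) else none)).toList

-- divide-and-conquer of Source B; the Nat argument is a fuel bound (= length) that only makes the
-- recursion structural — it never changes the computation (the split always terminates in Python too)
def pvGo (fuel : Nat) (tokens : List (String × String × String)) : List String :=
  match fuel, tokens with
  | _, [] => []
  | _, [t] => pvEmit t
  | 0, _ :: _ :: _ => []   -- unreachable when fuel ≥ length
  | fuel + 1, t1 :: t2 :: rest =>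
    let m := (t1 :: t2 :: rest).length / 2
    pvGo fuel ((t1 :: t2 :: rest).take m) ++ pvGo fuel ((t1 :: t2 :: rest).drop m)

def generar_codigo_intermedio_alt (tokens : List (String × String × String)) : List String :=
  pvGo tokens.length tokens

-- ===== PRECONDITION & SPEC =====
def Spec_generar_codigo_intermedio (tokens : List (String × String × String)) (out : List String) : Prop := out = generar_codigo_intermedio_alt tokens
instance (tokens : List (String × String × String)) (out : List String) : Decidable (Spec_generar_codigo_intermedio tokens out) := by unfold Spec_generar_codigo_intermedio; infer_instance

-- ===== CLAIM (what is proved, stated in full; the proofs are below) =====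
def Claim_equal_generar_codigo_intermedio : Prop := ∀ (tokens : List (String × String × String)), Dom_generar_codigo_intermedio tokens → Spec_generar_codigo_intermedio tokens (generar_codigo_intermedio tokens)

-- ===== LEMMAS AND PROOFS =====

-- B's divide-and-conquer equals a single filterMap over the tokens (take ++ drop flattens)
theorem pvGo_eq_filterMap (fuel : Nat) (tokens : List (String × String × String))
    (h : tokens.length ≤ fuel) :
    pvGo fuel tokens = tokens.filterMap (fun t => (pvEmit t).head?) := by
  induction fuel generalizing tokens with
  | zero =>
    match tokens, h with
    | [], _ => simp [pvGo]
    | [t], h => simp at h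
  | succ n ih =>
    match tokens with
    | [] => simp [pvGo]
    | [t] =>
      simp only [pvGo, List.filterMap_cons, List.filterMap_nil]
      cases he : pvEmit t with
      | nil => simp
      | cons a l =>
        have hl : (pvEmit t).length ≤ 1 := by
          unfold pvEmit; cases (pvPairs.findSome? _) <;> simp
        rw [he] at hl; simp at hl
        simp [hl]
    | t1 :: t2 :: rest =>
      simp only [pvGo]
      have hlen : (t1 :: t2 :: rest).length = rest.length + 2 := by simp
      rw [ih _ (by simp only [List.length_take]; omega),
          ih _ (by simp only [List.length_drop]; omega),
          ← List.filterMap_append, List.take_append_drop]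

theorem alt_eq_filterMap (tokens : List (String × String × String)) :
    generar_codigo_intermedio_alt tokens = tokens.filterMap (fun t => (pvEmit t).head?) :=
  pvGo_eq_filterMap tokens.length tokens (le_refl _)

-- A's fold equals acc ++ the same filterMap
theorem foldl_eq_append (tokens : List (String × String × String)) (acc : List String) :
    tokens.foldl (fun codigo_intermedio token =>
      let tipo := token.2.1
      let valor := token.2.2
      if tipo = "NUMERO" then codigo_intermedio ++ ["LOAD " ++ valor]
      else if tipo = "IDENTIFICADOR" then codigo_intermedio ++ ["STORE " ++ valor]
      else if tipo = "OPERADOR_ARITMETICO" then codigo_intermedio ++ ["OPER " ++ valor]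
      else if tipo = "OPERADOR_ASIGNACION" then codigo_intermedio ++ ["ASSIGN " ++ valor]
      else if tipo = "OPERADOR_COMPARACION" then codigo_intermedio ++ ["COMPARE " ++ valor]
      else codigo_intermedio) acc
      = acc ++ tokens.filterMap (fun t => (pvEmit t).head?) := by
  induction tokens generalizing acc with
  | nil => simp
  | cons t ts ih =>
    simp only [List.foldl_cons, List.filterMap_cons]
    by_cases h1 : t.2.1 = "NUMERO"
    · simp [h1, ih, pvEmit, pvPairs, List.findSome?]
    · by_cases h2 : t.2.1 = "IDENTIFICADOR"
      · simp [h2, ih, pvEmit, pvPairs, List.findSome?]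
      · by_cases h3 : t.2.1 = "OPERADOR_ARITMETICO"
        · simp [h3, ih, pvEmit, pvPairs, List.findSome?]
        · by_cases h4 : t.2.1 = "OPERADOR_ASIGNACION"
          · simp [h4, ih, pvEmit, pvPairs, List.findSome?]
          · by_cases h5 : t.2.1 = "OPERADOR_COMPARACION"
            · simp [h5, ih, pvEmit, pvPairs, List.findSome?]
            · simp [if_neg h1, if_neg h2, if_neg h3, if_neg h4, if_neg h5, ih, pvEmit, pvPairs, List.findSome?, Ne.symm h1, Ne.symm h2, Ne.symm h3, Ne.symm h4, Ne.symm h5]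

-- ===== VERDICT (by name: the statement is the Claim_ definition above) =====
theorem generar_codigo_intermedio_spec : Claim_equal_generar_codigo_intermedio := by
  intro tokens _
  unfold Spec_generar_codigo_intermedio generar_codigo_intermedio
  rw [alt_eq_filterMap]
  simpa using foldl_eq_append tokens []
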